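-- pv_equiv track=rewrite | github.com/reVIVEer/advent_of_code_2022 | day_5/day_5.py | get_cleaned_input
-- ===== SOURCE A (Python) =====
-- def get_cleaned_input(inp):
--     stacks_config, steps = inp[: inp.index("") - 1], inp[inp.index("") + 1 :]
--
--     stacks_config_alt = []
--     for row in stacks_config:
--         stacks_config_alt.append([row[i : i + 3] for i in range(0, len(row), 4)])
--
--     transposed = [list(x) for x in zip(*stacks_config_alt)]
--     cleaned_sc = [[j for j in i if j.isspace() == False] for i in transposed]
--     cleaned_sc = [stack[::-1] for stack in cleaned_sc]
--
--     return cleaned_sc, steps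
-- ===== SOURCE B (Python) =====
-- def get_cleaned_input(inp):
--     idx = inp.index("")
--     stacks_config, steps = inp[: idx - 1], inp[idx + 1 :]
--
--     cols = min(((len(row) + 3) // 4 for row in stacks_config), default=0)
--     cleaned_sc = []
--     for c in range(cols):
--         stack = []
--         for row in reversed(stacks_config):
--             cell = row[4 * c : 4 * c + 3]
--             if not cell.isspace():
--                 stack.append(cell)
--         cleaned_sc.append(stack)
--     return cleaned_sc, steps
-- ===== Notes on version B (the rewrite author's own statement) =====
-- stated objective: alternative
-- what changed: Replaces A's chunk-rows -> zip-transpose -> filter -> reverse pipeline with a single column-major pass: the column count is the minimum per-row chunk count (matching zip's shortest-row truncation) and each stack is built directly bottom-up by scanning the config rows in reverse and slicing out column c, skipping whitespace cells.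
import Mathlib
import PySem

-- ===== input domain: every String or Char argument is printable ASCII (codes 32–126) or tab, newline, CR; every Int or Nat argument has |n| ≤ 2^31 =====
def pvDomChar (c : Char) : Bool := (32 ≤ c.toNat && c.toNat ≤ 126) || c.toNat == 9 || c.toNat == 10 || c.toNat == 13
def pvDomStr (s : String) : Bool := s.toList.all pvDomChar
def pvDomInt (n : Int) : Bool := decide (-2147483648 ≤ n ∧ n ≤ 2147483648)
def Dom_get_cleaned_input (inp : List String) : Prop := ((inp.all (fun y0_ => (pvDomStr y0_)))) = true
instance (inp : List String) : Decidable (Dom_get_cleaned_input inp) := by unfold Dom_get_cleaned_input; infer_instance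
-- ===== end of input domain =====

-- B replaces A's chunk→zip-transpose→filter→reverse pipeline by a single column-major
-- loop (column count = min chunk count, stacks built bottom-up from reversed rows); objective: simpler.

-- ===== PORT A =====
-- zip(*rows) followed by list(): rounds of heads while every list is nonempty (exact for zip's shortest-input truncation; zip() of no lists is []).
def transposeZ {α : Type} [Inhabited α] (ls : List (List α)) : List (List α) :=
  match ls with
  | [] => []
  | r :: rs =>
    if h : ((r :: rs).all fun l => !l.isEmpty) = true then
      (r :: rs).map (fun l => l.headD default) :: transposeZ (r.tail :: rs.map List.tail)
    else []
termination_by (ls.headD []).length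
decreasing_by
  simp only [List.headD_cons]
  simp only [List.all_cons, Bool.and_eq_true, Bool.not_eq_true'] at h
  cases r with
  | nil => simp at h
  | cons a t => simp

def get_cleaned_input (inp : List String) : List (List String) × List String :=
  let idx : Int := (((PySem.List.index? inp "").getD 0 : Nat) : Int)
  let stacks_config := PySem.List.slice inp none (some (idx - 1))
  let steps := PySem.List.slice inp (some (idx + 1)) none
  let stacks_config_alt := stacks_config.foldl (fun acc row =>
      acc ++ [(PySem.List.pyRange 0 (PySem.Str.len row) 4).map
        (fun i => PySem.Str.slice row (some i) (some (i + 3)))]) []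
  let transposed := transposeZ stacks_config_alt
  let cleaned_sc := transposed.map (fun i => i.filter (fun j => PySem.Str.strIsspace j == false))
  let cleaned_sc2 := cleaned_sc.map (fun stack => (PySem.List.slice? stack none none (-1)).getD [])
  (cleaned_sc2, steps)

-- ===== PORT B =====
def get_cleaned_input_alt (inp : List String) : List (List String) × List String :=
  let idx : Int := (((PySem.List.index? inp "").getD 0 : Nat) : Int)
  let stacks_config := PySem.List.slice inp none (some (idx - 1))
  let steps := PySem.List.slice inp (some (idx + 1)) none
  let cols : Int := PySem.List.minD
    (stacks_config.map (fun row => PySem.Int.floordiv (PySem.Str.len row + 3) 4)) (fun x => x) 0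
  let cleaned_sc := (PySem.List.pyRange 0 cols 1).foldl (fun acc c =>
      acc ++ [stacks_config.reverse.foldl (fun stack row =>
        let cell := PySem.Str.slice row (some (4 * c)) (some (4 * c + 3))
        if !(PySem.Str.strIsspace cell) then stack ++ [cell] else stack) []]) []
  (cleaned_sc, steps)

-- ===== PRECONDITION & SPEC =====
-- Pre_ excludes exactly the inputs with no "" element, where Python A raises ValueError at inp.index("").
def Pre_get_cleaned_input (inp : List String) : Prop := "" ∈ inp
instance (inp : List String) : Decidable (Pre_get_cleaned_input inp) := by unfold Pre_get_cleaned_input; infer_instance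
def pvWitness_get_cleaned_input : List String := ["[A] [B]", " 1   2 ", "", "move 1 from 2 to 1"]

def Spec_get_cleaned_input (inp : List String) (out : List (List String) × List String) : Prop := out = get_cleaned_input_alt inp
instance (inp : List String) (out : List (List String) × List String) : Decidable (Spec_get_cleaned_input inp out) := by unfold Spec_get_cleaned_input; infer_instance

-- ===== CLAIM (what is proved, stated in full; the proofs are below) =====
def Claim_equal_get_cleaned_input : Prop := ∀ (inp : List String), Dom_get_cleaned_input inp → Pre_get_cleaned_input inp → Spec_get_cleaned_input inp (get_cleaned_input inp)

-- ===== LEMMAS AND PROOFS =====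

def minLenL {α : Type} : List (List α) → Nat
  | [] => 0
  | l :: ls => ls.foldl (fun a x => min a x.length) l.length

theorem foldl_min_le_init {α : Type} (g : α → Nat) (l : List α) (a : Nat) :
    l.foldl (fun a x => min a (g x)) a ≤ a ∧ ∀ x ∈ l, l.foldl (fun a x => min a (g x)) a ≤ g x := by
  induction l generalizing a with
  | nil => simp
  | cons y t ih =>
    obtain ⟨h1, h2⟩ := ih (min a (g y))
    refine ⟨le_trans h1 (by omega), ?_⟩
    intro x hx
    rcases List.mem_cons.mp hx with rfl | hx
    · exact le_trans h1 (by omega)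
    · exact h2 x hx

theorem le_foldl_min_init {α : Type} (g : α → Nat) (l : List α) (a c : Nat)
    (ha : c ≤ a) (hl : ∀ x ∈ l, c ≤ g x) :
    c ≤ l.foldl (fun a x => min a (g x)) a := by
  induction l generalizing a with
  | nil => simpa
  | cons y t ih =>
    exact ih (min a (g y)) (le_min ha (hl y (by simp))) (fun x hx => hl x (by simp [hx]))

theorem foldl_min_sub_one {α : Type} (g : α → Nat) (l : List α) (a : Nat) :
    l.foldl (fun a x => min a (g x - 1)) (a - 1) = l.foldl (fun a x => min a (g x)) a - 1 := by
  induction l generalizing a with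
  | nil => rfl
  | cons y t ih =>
    simp only [List.foldl_cons]
    rw [show min (a - 1) (g y - 1) = min a (g y) - 1 by omega]
    exact ih (min a (g y))

theorem getD_succ_tail {α : Type} (l : List α) (c : Nat) (d : α) :
    l.getD (c + 1) d = l.tail.getD c d := by
  cases l <;> rfl

theorem headD_eq_getD {α : Type} (l : List α) (d : α) : l.headD d = l.getD 0 d := by
  cases l <;> rfl

theorem transposeZ_eq_aux {α : Type} [Inhabited α] (n : Nat) :
    ∀ (ls : List (List α)), (ls.headD []).length ≤ n → ls ≠ [] →
    transposeZ ls = (List.range (minLenL ls)).map (fun c => ls.map (fun l => l.getD c default)) := by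
  induction n with
  | zero =>
    intro ls hn h
    match ls, h with
    | r :: rs, _ =>
      have hr : r = [] := by
        simp only [List.headD_cons] at hn
        exact List.eq_nil_of_length_eq_zero (by omega)
      rw [transposeZ, dif_neg (by simp [hr])]
      have h0 : minLenL (r :: rs) = 0 := by
        simp only [minLenL, hr]
        have := (foldl_min_le_init List.length rs ([] : List α).length).1
        simpa using this
      rw [h0]; rfl
  | succ n ihn =>
    intro ls hn h
    match ls, h with
    | r :: rs, _ =>
      by_cases hall : ((r :: rs).all fun l => !l.isEmpty) = true
      · rw [transposeZ, dif_pos hall]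
        have hmem : ∀ x ∈ r :: rs, 1 ≤ x.length := by
          intro x hx
          have := List.all_eq_true.mp hall x hx
          cases x; · simp at this
          · simp
        have hmin1 : 1 ≤ minLenL (r :: rs) := by
          simp only [minLenL]
          exact le_foldl_min_init _ rs r.length 1 (hmem r (by simp)) (fun x hx => hmem x (by simp [hx]))
        have htails : minLenL (r.tail :: rs.map List.tail) = minLenL (r :: rs) - 1 := by
          simp only [minLenL]
          rw [List.foldl_map]
          have : ∀ (x : List α), x.tail.length = x.length - 1 := fun x => by cases x <;> simp
          simp only [this]
          exact foldl_min_sub_one List.length rs r.length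
        have hrec := ihn (r.tail :: rs.map List.tail)
          (by
            simp only [List.headD_cons] at hn ⊢
            have h2 : r.tail.length = r.length - 1 := by cases r <;> simp
            omega)
          (by simp)
        rw [hrec]
        obtain ⟨k, hk⟩ : ∃ k, minLenL (r :: rs) = k + 1 := ⟨minLenL (r :: rs) - 1, by omega⟩
        rw [hk, htails, hk]
        simp only [Nat.add_sub_cancel]
        rw [List.range_succ_eq_map]
        simp only [List.map_cons, List.map_map]
        congr 1
        · congr 1
          · exact headD_eq_getD r default
          · exact List.map_congr_left (fun x _ => headD_eq_getD x default)
        · apply List.map_congr_left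
          intro c _
          simp only [Function.comp]
          congr 1
          · exact (getD_succ_tail r c default).symm
          · exact List.map_congr_left (fun x _ => (getD_succ_tail x c default).symm)
      · rw [transposeZ, dif_neg hall]
        have hex : ∃ x ∈ r :: rs, x.length = 0 := by
          by_contra hc
          push Not at hc
          apply hall
          refine List.all_eq_true.mpr (fun x hx => ?_)
          have := hc x hx
          cases x; · simp at this
          · simp
        obtain ⟨x, hx, hx0⟩ := hex
        have h0 : minLenL (r :: rs) = 0 := by
          simp only [minLenL]
          rcases List.mem_cons.mp hx with rfl | hx'
          · have := (foldl_min_le_init List.length rs x.length).1; omega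
          · have := (foldl_min_le_init List.length rs r.length).2 x hx'; omega
        rw [h0]; rfl

theorem transposeZ_eq {α : Type} [Inhabited α] (ls : List (List α)) (h : ls ≠ []) :
    transposeZ ls = (List.range (minLenL ls)).map (fun c => ls.map (fun l => l.getD c default)) :=
  transposeZ_eq_aux (ls.headD []).length ls le_rfl h

theorem foldl_min_cast {α : Type} (g : α → Nat) (l : List α) (a : Nat) :
    l.foldl (fun (acc : Int) x => min acc ((g x : Nat) : Int)) ((a : Nat) : Int)
      = ((l.foldl (fun acc x => min acc (g x)) a : Nat) : Int) := by
  induction l generalizing a with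
  | nil => rfl
  | cons y t ih =>
    simp only [List.foldl_cons]
    rw [show min ((a : Nat) : Int) ((g y : Nat) : Int) = ((min a (g y) : Nat) : Int) by push_cast; rfl]
    exact ih (min a (g y))

theorem cnt_eq (row : String) :
    PySem.Int.floordiv (PySem.Str.len row + 3) 4
      = (((PySem.List.pyRange 0 (PySem.Str.len row) 4).length : Nat) : Int) := by
  rw [PySem.Int.floordiv_eq_ediv_of_pos (by norm_num)]
  rw [PySem.List.pyRange_of_pos 0 (PySem.Str.len row) (by norm_num)]
  simp only [List.length_map, List.length_range, PySem.Str.len_eq]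
  split_ifs with h
  · omega
  · omega

theorem chunk_getD (row : String) (c : Nat) (d : String)
    (hc : c < (PySem.List.pyRange 0 (PySem.Str.len row) 4).length) :
    ((PySem.List.pyRange 0 (PySem.Str.len row) 4).map
        (fun i => PySem.Str.slice row (some i) (some (i + 3)))).getD c d
      = PySem.Str.slice row (some (4 * (c : Int))) (some (4 * (c : Int) + 3)) := by
  rw [List.getD_eq_getElem?_getD, List.getElem?_map, List.getElem?_eq_getElem hc]
  simp only [Option.map_some, Option.getD_some]
  have h4 : (PySem.List.pyRange 0 (PySem.Str.len row) 4)[c] = 4 * (c : Int) := by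
    have hrw := PySem.List.pyRange_of_pos 0 (PySem.Str.len row) (s := 4) (by norm_num)
    rw [List.getElem_of_eq hrw, List.getElem_map, List.getElem_range]
    ring
  rw [h4]

theorem stacks_eq (rows : List String) :
    ((transposeZ (rows.foldl (fun acc row =>
        acc ++ [(PySem.List.pyRange 0 (PySem.Str.len row) 4).map
          (fun i => PySem.Str.slice row (some i) (some (i + 3)))]) [])).map
      (fun i => i.filter (fun j => PySem.Str.strIsspace j == false))).map
        (fun stack => (PySem.List.slice? stack none none (-1)).getD [])
    = (PySem.List.pyRange 0 (PySem.List.minD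
        (rows.map (fun row => PySem.Int.floordiv (PySem.Str.len row + 3) 4)) (fun x => x) 0) 1).foldl
      (fun acc c => acc ++ [rows.reverse.foldl (fun stack row =>
        let cell := PySem.Str.slice row (some (4 * c)) (some (4 * c + 3))
        if !(PySem.Str.strIsspace cell) then stack ++ [cell] else stack) []]) [] := by
  rw [PySem.List.foldl_append_singleton_eq_map, PySem.List.foldl_append_singleton_eq_map]
  simp only [List.nil_append]
  cases rows with
  | nil =>
    rw [transposeZ.eq_def]
    simp [PySem.List.minD, PySem.List.min?, PySem.List.pyRange]
  | cons r rs =>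
    have hcols : PySem.List.minD ((r :: rs).map (fun row => PySem.Int.floordiv (PySem.Str.len row + 3) 4)) (fun x => x) 0
        = ((minLenL ((r :: rs).map (fun row => (PySem.List.pyRange 0 (PySem.Str.len row) 4).map
            (fun i => PySem.Str.slice row (some i) (some (i + 3))))) : Nat) : Int) := by
      simp only [List.map_cons, PySem.List.minD, PySem.List.min?_id_cons, Option.getD_some, minLenL]
      simp only [cnt_eq]
      rw [List.foldl_map, List.foldl_map]
      simp only [List.length_map]
      exact foldl_min_cast _ rs _
    rw [hcols]
    have hmle : ∀ row ∈ r :: rs,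
        minLenL ((r :: rs).map (fun row => (PySem.List.pyRange 0 (PySem.Str.len row) 4).map
          (fun i => PySem.Str.slice row (some i) (some (i + 3)))))
          ≤ (PySem.List.pyRange 0 (PySem.Str.len row) 4).length := by
      intro row hrow
      simp only [List.map_cons, minLenL, List.foldl_map, List.length_map]
      rcases List.mem_cons.mp hrow with rfl | hrow'
      · exact (foldl_min_le_init _ rs _).1
      · exact (foldl_min_le_init _ rs _).2 row hrow'
    rw [transposeZ_eq _ (by simp)]
    rw [PySem.List.pyRange_one]
    simp only [Int.sub_zero, Int.toNat_natCast, zero_add, List.map_map]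
    apply List.map_congr_left
    intro c hc
    have hcm := List.mem_range.mp hc
    simp only [Function.comp_apply]
    rw [PySem.List.slice?_none_none_neg_one, Option.getD_some]
    show _ = (r :: rs).reverse.foldl (fun stack row =>
        if !(PySem.Str.strIsspace (PySem.Str.slice row (some (4 * (c : Int))) (some (4 * (c : Int) + 3)))) then
          stack ++ [PySem.Str.slice row (some (4 * (c : Int))) (some (4 * (c : Int) + 3))]
        else stack) []
    rw [PySem.List.foldl_append_if]
    simp only [List.nil_append, List.filter_reverse, List.map_reverse]
    congr 1
    rw [List.filter_map]
    simp only [Function.comp_def]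
    have hfil : (r :: rs).filter (fun row => PySem.Str.strIsspace
          (((PySem.List.pyRange 0 (PySem.Str.len row) 4).map
            (fun i => PySem.Str.slice row (some i) (some (i + 3)))).getD c default) == false)
        = (r :: rs).filter (fun row => !(PySem.Str.strIsspace
            (PySem.Str.slice row (some (4 * (c : Int))) (some (4 * (c : Int) + 3))))) := by
      apply List.filter_congr
      intro row hrow
      rw [chunk_getD row c default (lt_of_lt_of_le hcm (hmle row hrow))]
      cases PySem.Str.strIsspace (PySem.Str.slice row (some (4 * (c : Int))) (some (4 * (c : Int) + 3))) <;> rfl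
    rw [hfil]
    apply List.map_congr_left
    intro row hrow
    exact chunk_getD row c default (lt_of_lt_of_le hcm (hmle row (List.mem_filter.mp hrow).1))

-- ===== VERDICT (by name: the statement is the Claim_ definition above) =====
theorem get_cleaned_input_spec : Claim_equal_get_cleaned_input := by
  intro inp _ _
  show get_cleaned_input inp = get_cleaned_input_alt inp
  simp only [get_cleaned_input, get_cleaned_input_alt]
  exact congrArg (·, _) (stacks_eq _)
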